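-- pv_equiv track=rewrite | github.com/jkeevk/netology_homeworks | secretary.py | get_directory
-- ===== SOURCE A (Python) =====
-- directories = {
--         '1': ['2207 876234', '11-2', '5455 028765'],
--         '2': ['10006'],
--         '3': []
--       }
--
-- def get_directory(doc_number):
--     found = False
--     for key, value in directories.items():
--         for num in value:
--             if num == doc_number:
--                 return(key)
--                 found = True
--     if not found:
--         return('Полки с таким документом не найдено')
-- ===== SOURCE B (Python) =====
-- directories = {
--         '1': ['2207 876234', '11-2', '5455 028765'],
--         '2': ['10006'],
--         '3': []
--       }
--
-- _index = {num: key for key, value in directories.items() for num in value}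
--
-- def get_directory(doc_number):
--     return _index.get(doc_number, 'Полки с таким документом не найдено')
-- ===== Notes on version B (the rewrite author's own statement) =====
-- stated objective: idiomatic
-- what changed: B builds a reverse index (document number -> shelf key) once with a dict comprehension and answers each call with a single dict.get, instead of A's per-call nested scan over the shelves.
import Mathlib
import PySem

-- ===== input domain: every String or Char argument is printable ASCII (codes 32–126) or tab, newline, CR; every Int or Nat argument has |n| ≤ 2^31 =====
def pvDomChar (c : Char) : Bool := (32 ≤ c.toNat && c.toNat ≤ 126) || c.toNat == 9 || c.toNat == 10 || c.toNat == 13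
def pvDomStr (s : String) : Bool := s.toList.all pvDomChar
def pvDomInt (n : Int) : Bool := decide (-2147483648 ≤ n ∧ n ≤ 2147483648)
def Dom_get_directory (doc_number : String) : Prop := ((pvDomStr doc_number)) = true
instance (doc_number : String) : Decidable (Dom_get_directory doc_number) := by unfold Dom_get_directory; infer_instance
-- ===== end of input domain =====

-- B replaces A's per-call nested scan by a prebuilt reverse index (doc number -> shelf key)
-- queried with a single dict lookup (objective: idiomatic). Equivalence of return values proved.

-- ===== PORT A =====
def directories : PySem.Dict String (List String) :=
  PySem.Dict.ofList
    [("1", ["2207 876234", "11-2", "5455 028765"]),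
     ("2", ["10006"]),
     ("3", [])]

-- inner 'for num in value: if num == doc_number: return key'
def aInner (value : List String) (doc_number : String) : Bool :=
  match value with
  | [] => false
  | num :: rest => if num == doc_number then true else aInner rest doc_number

-- outer 'for key, value in directories.items()'
def aScan (items : List (String × List String)) (doc_number : String) : Option String :=
  match items with
  | [] => none
  | (key, value) :: rest =>
      if aInner value doc_number then some key else aScan rest doc_number

def get_directory (doc_number : String) : String :=
  match aScan directories.items doc_number with
  | some key => key
  | none => "Полки с таким документом не найдено"

-- ===== PORT B =====
-- _index = {num: key for key, value in directories.items() for num in value}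
def bIndex : PySem.Dict String String :=
  directories.items.foldl
    (fun d kv => kv.2.foldl (fun d num => d.insert num kv.1) d)
    PySem.Dict.empty

def get_directory_alt (doc_number : String) : String :=
  bIndex.getD doc_number "Полки с таким документом не найдено"

-- ===== PRECONDITION & SPEC =====
def Spec_get_directory (doc_number : String) (out : String) : Prop := out = get_directory_alt doc_number
instance (doc_number : String) (out : String) : Decidable (Spec_get_directory doc_number out) := by unfold Spec_get_directory; infer_instance

-- ===== CLAIM (what is proved, stated in full; the proofs are below) =====
def Claim_equal_get_directory : Prop := ∀ (doc_number : String), Dom_get_directory doc_number → Spec_get_directory doc_number (get_directory doc_number)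

-- ===== LEMMAS AND PROOFS =====
theorem equal_all (doc_number : String) :
    get_directory doc_number = get_directory_alt doc_number := by
  by_cases h1 : doc_number = "2207 876234"
  · subst h1; decide
  by_cases h2 : doc_number = "11-2"
  · subst h2; decide
  by_cases h3 : doc_number = "5455 028765"
  · subst h3; decide
  by_cases h4 : doc_number = "10006"
  · subst h4; decide
  simp [get_directory, get_directory_alt, aScan, aInner, directories, bIndex,
    PySem.Dict.ofList, PySem.Dict.update, PySem.Dict.empty, PySem.Dict.getD,
    PySem.Dict.get?, PySem.Dict.insert, PySem.Dict.contains, List.find?,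
    Ne.symm h1, Ne.symm h2, Ne.symm h3, Ne.symm h4,
    beq_eq_false_iff_ne.mpr (Ne.symm h1), beq_eq_false_iff_ne.mpr (Ne.symm h2),
    beq_eq_false_iff_ne.mpr (Ne.symm h3), beq_eq_false_iff_ne.mpr (Ne.symm h4)]

-- ===== VERDICT (by name: the statement is the Claim_ definition above) =====
theorem get_directory_spec : Claim_equal_get_directory := by
  intro doc_number _
  unfold Spec_get_directory
  exact equal_all doc_number
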